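-- pv_equiv track=rewrite | github.com/redradist/DeterministicGarbageCollectorPointer | scripts/clang_extras.py | adjust_args
-- ===== SOURCE A (Python) =====
-- def adjust_args(args):
--     new_args = [arg for arg in args if arg]
--     idx = 0
--     should_remove = False
--     while idx < len(new_args):
--         if new_args[idx] == '-o' or new_args[idx] == '-c':
--             del new_args[idx]
--             should_remove = True
--         elif should_remove:
--             del new_args[idx]
--         else:
--             idx += 1
--     return new_args
-- ===== SOURCE B (Python) =====
-- def adjust_args(args):
--     idx = next((i for i, a in enumerate(args) if a == '-o' or a == '-c'), len(args))
--     return [a for a in args[:idx] if a]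
-- ===== Notes on version B (the rewrite author's own statement) =====
-- stated objective: simpler
-- what changed: Replaces the in-place delete-while-scanning loop over a mutable index with a two-step decomposition: find the first '-o'/'-c' cut-off index, then slice and filter empties in one comprehension.
import Mathlib
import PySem

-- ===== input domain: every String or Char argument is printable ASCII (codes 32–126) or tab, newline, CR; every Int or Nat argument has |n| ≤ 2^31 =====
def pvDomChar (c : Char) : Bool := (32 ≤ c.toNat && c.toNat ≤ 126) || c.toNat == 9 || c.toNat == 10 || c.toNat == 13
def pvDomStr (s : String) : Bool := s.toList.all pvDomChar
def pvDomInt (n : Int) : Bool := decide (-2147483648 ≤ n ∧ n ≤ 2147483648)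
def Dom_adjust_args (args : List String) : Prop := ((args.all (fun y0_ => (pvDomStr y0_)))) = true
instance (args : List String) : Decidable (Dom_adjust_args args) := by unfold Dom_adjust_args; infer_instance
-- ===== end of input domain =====

-- B replaces A's delete-while-scanning loop with find-cut-index, slice and filter (objective: simpler).
-- ===== PORT A =====
-- the while-loop of A over new_args with index/del, as structural recursion on the remaining suffix
def adjustLoopA : List String → Bool → List String
  | [], _ => []
  | a :: rest, sr =>
    if a = "-o" ∨ a = "-c" then adjustLoopA rest true
    else if sr then adjustLoopA rest sr
    else a :: adjustLoopA rest sr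

def adjust_args (args : List String) : List String :=
  adjustLoopA (args.filter (fun arg => arg ≠ "")) false

-- ===== PORT B =====
-- idx = next((i for i,a in enumerate(args) if a == '-o' or a == '-c'), len(args))
def adjustCutIdx : List String → Nat
  | [] => 0
  | a :: rest => if a = "-o" ∨ a = "-c" then 0 else adjustCutIdx rest + 1

def adjust_args_alt (args : List String) : List String :=
  (args.take (adjustCutIdx args)).filter (fun a => a ≠ "")

-- ===== PRECONDITION & SPEC =====
def Spec_adjust_args (args : List String) (out : List String) : Prop := out = adjust_args_alt args
instance (args : List String) (out : List String) : Decidable (Spec_adjust_args args out) := by unfold Spec_adjust_args; infer_instance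

-- ===== CLAIM (what is proved, stated in full; the proofs are below) =====
def Claim_equal_adjust_args : Prop := ∀ (args : List String), Dom_adjust_args args → Spec_adjust_args args (adjust_args args)

-- ===== LEMMAS AND PROOFS =====
theorem adjustLoopA_true (l : List String) : adjustLoopA l true = [] := by
  induction l with
  | nil => rfl
  | cons a rest ih => simp [adjustLoopA, ih]

theorem adjustLoopA_false (l : List String) :
    adjustLoopA l false = l.takeWhile (fun a => ¬ (a = "-o" ∨ a = "-c")) := by
  induction l with
  | nil => rfl
  | cons a rest ih =>
    by_cases h : a = "-o" ∨ a = "-c"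
    · simp [adjustLoopA, h, adjustLoopA_true, List.takeWhile_cons, not_or]
      tauto
    · simp [adjustLoopA, h, ih, List.takeWhile_cons, not_or]
      tauto

theorem takeWhile_filter_cut (args : List String) :
    (args.filter (fun arg => arg ≠ "")).takeWhile (fun a => ¬ (a = "-o" ∨ a = "-c"))
      = (args.take (adjustCutIdx args)).filter (fun a => a ≠ "") := by
  induction args with
  | nil => rfl
  | cons a rest ih =>
    by_cases he : a = ""
    · subst he
      have hs : ¬ (("" : String) = "-o" ∨ ("" : String) = "-c") := by decide
      simp only [adjustCutIdx, List.filter_cons, List.take_succ_cons, decide_eq_true_eq,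
        ne_eq, not_true_eq_false, decide_false, Bool.false_eq_true, if_false]
      simpa [not_or] using ih
    · by_cases h : a = "-o" ∨ a = "-c"
      · simp [adjustCutIdx, h, he, List.takeWhile_cons, not_or]
        tauto
      · obtain ⟨h1, h2⟩ := not_or.mp h
        have hcut : adjustCutIdx (a :: rest) = adjustCutIdx rest + 1 := by
          simp [adjustCutIdx, h]
        rw [hcut, List.take_succ_cons]
        simp [List.takeWhile_cons, List.filter_cons, he, h1, h2]
        simpa [not_or] using ih

-- ===== VERDICT (by name: the statement is the Claim_ definition above) =====
theorem adjust_args_spec : Claim_equal_adjust_args := by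
  intro args _
  unfold Spec_adjust_args adjust_args adjust_args_alt
  rw [adjustLoopA_false, takeWhile_filter_cut]
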